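-- pv_equiv track=rewrite | github.com/gsy/leetcode | binarysearch/longestDupSubstring.py | search
-- ===== SOURCE A (Python) =====
-- def search(nums, steps, length):
--     base = 26
--     modulus = 2**64
--
--     prev = 0
--     for i in range(steps):
--         prev = (prev * base + nums[i]) % modulus
--
--     seen = {prev}
--
--     aL = pow(base, steps, modulus)
--     for start in range(1, length - steps + 1):
--         # compute rolling hash in O(1) time
--         prev = (prev * base - nums[start - 1] * aL + nums[start + steps - 1]) % modulus
--
--         if prev in seen:
--             return True, start
--
--         seen.add(prev)
--     return False, 0
-- ===== SOURCE B (Python) =====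
-- def search(nums, steps, length):
--     base = 26
--     modulus = 2 ** 64
--
--     # direct polynomial hash of each window, from a precomputed power table
--     powers = [pow(base, steps - 1 - j, modulus) for j in range(steps)]
--
--     def window_hash(start):
--         return sum(nums[start + j] * p for j, p in enumerate(powers)) % modulus
--
--     seen = {window_hash(0)}
--     for start in range(1, length - steps + 1):
--         h = window_hash(start)
--         if h in seen:
--             return True, start
--         seen.add(h)
--     return False, 0
-- ===== Notes on version B (the rewrite author's own statement) =====
-- stated objective: alternative
-- what changed: Replaces the O(1) rolling-hash update (and the Horner seed loop) by recomputing each window's polynomial hash directly as a sum over a precomputed modular power table; hash values, the seen set and the scan order are identical.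
-- outside the precondition, e.g. on search([1, 1, 1], 2, 1000): A returns (True, 1), B returns (True, 1)
import Mathlib
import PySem

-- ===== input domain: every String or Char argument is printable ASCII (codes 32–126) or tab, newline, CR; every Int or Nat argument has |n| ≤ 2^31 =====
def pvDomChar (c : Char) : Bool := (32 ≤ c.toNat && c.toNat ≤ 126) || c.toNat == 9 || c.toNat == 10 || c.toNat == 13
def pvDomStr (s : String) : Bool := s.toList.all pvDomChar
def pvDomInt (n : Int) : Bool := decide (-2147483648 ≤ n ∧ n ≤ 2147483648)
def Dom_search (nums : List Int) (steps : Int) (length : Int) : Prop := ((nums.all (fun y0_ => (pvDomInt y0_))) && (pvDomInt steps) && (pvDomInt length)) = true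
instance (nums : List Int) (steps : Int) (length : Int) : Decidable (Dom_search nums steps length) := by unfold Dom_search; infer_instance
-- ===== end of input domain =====

-- B replaces A's rolling-hash update by a direct per-window polynomial-hash recomputation
-- from a precomputed power table (same hash values, same seen set, same scan order).

-- ===== PORT A =====
-- the second for-loop of A, with early return (base = 26 inlined); Python's
-- range(1, stop) is iterated lazily: fuel = number of remaining iterations,
-- start = the current loop variable
def aLoop (nums : List Int) (steps aL modulus : Int) :
    Nat → Int → Int → PySem.Set Int → Bool × Int
  | 0, _, _, _ => (false, 0)
  | fuel + 1, start, prev, seen =>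
    let prev' := PySem.Int.mod
      (prev * 26 - PySem.List.pyGetD nums (start - 1) 0 * aL
        + PySem.List.pyGetD nums (start + steps - 1) 0) modulus
    if PySem.Set.contains seen prev' then (true, start)
    else aLoop nums steps aL modulus fuel (start + 1) prev' (PySem.Set.add seen prev')

-- indexing is total via pyGetD 0; in range under Pre_search.  pow(base, steps, modulus)
-- is PySem.Int.powMod with exponent steps.toNat (Pre_search gives 0 ≤ steps; for steps < 0
-- Python's pow raises ValueError, excluded by Pre_search).
def search (nums : List Int) (steps : Int) (length : Int) : Bool × Int :=
  let modulus : Int := 2 ^ 64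
  let prev := (PySem.List.pyRange 0 steps 1).foldl
      (fun prev i => PySem.Int.mod (prev * 26 + PySem.List.pyGetD nums i 0) modulus) 0
  let seen := PySem.Set.add PySem.Set.empty prev
  let aL := PySem.Int.powMod 26 steps.toNat modulus
  aLoop nums steps aL modulus ((length - steps + 1) - 1).toNat 1 prev seen

-- ===== PORT B =====
-- powers = [pow(26, steps-1-j, modulus) for j in range(steps)]
def altPowers (steps modulus : Int) : List Int :=
  (PySem.List.pyRange 0 steps 1).map
    (fun j => PySem.Int.powMod 26 (steps - 1 - j).toNat modulus)

-- window_hash(start) = sum(nums[start+j] * p for j, p in enumerate(powers)) % modulus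
def altWindowHash (nums powers : List Int) (modulus start : Int) : Int :=
  PySem.Int.mod
    ((PySem.List.enumerate powers).foldl
      (fun acc jp => acc + PySem.List.pyGetD nums (start + jp.1) 0 * jp.2) 0) modulus

-- for start in range(1, length - steps + 1), iterated lazily as in aLoop
def altLoop (nums powers : List Int) (modulus : Int) :
    Nat → Int → PySem.Set Int → Bool × Int
  | 0, _, _ => (false, 0)
  | fuel + 1, start, seen =>
    let h := altWindowHash nums powers modulus start
    if PySem.Set.contains seen h then (true, start)
    else altLoop nums powers modulus fuel (start + 1) (PySem.Set.add seen h)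

def search_alt (nums : List Int) (steps : Int) (length : Int) : Bool × Int :=
  let modulus : Int := 2 ^ 64
  let powers := altPowers steps modulus
  altLoop nums powers modulus ((length - steps + 1) - 1).toNat 1
    (PySem.Set.add PySem.Set.empty (altWindowHash nums powers modulus 0))

-- ===== PRECONDITION & SPEC =====
-- Exactly the inputs on which the Python A returns: steps < 0 makes pow(26, steps, 2**64)
-- raise ValueError; steps > len(nums) makes the seed loop raise IndexError; and when the
-- scan loop runs (steps < length) its last window needs nums[length-1], so length > len(nums)
-- raises IndexError.  Pre_ therefore also excludes inputs with length > len(nums) on which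
-- A happens to return early (a duplicate hash found before the first out-of-range access);
-- A and B agree there too, but avoiding the IndexError depends on the data, not on a
-- checkable shape of the input.
def Pre_search (nums : List Int) (steps : Int) (length : Int) : Prop :=
  0 ≤ steps ∧ steps ≤ (nums.length : Int) ∧ (steps < length → length ≤ (nums.length : Int))
instance (nums : List Int) (steps : Int) (length : Int) : Decidable (Pre_search nums steps length) := by unfold Pre_search; infer_instance

def pvWitness_search : List Int × Int × Int := ([1, 1], 1, 2)

def Spec_search (nums : List Int) (steps : Int) (length : Int) (out : Bool × Int) : Prop := out = search_alt nums steps length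
instance (nums : List Int) (steps : Int) (length : Int) (out : Bool × Int) : Decidable (Spec_search nums steps length out) := by unfold Spec_search; infer_instance

-- ===== CLAIM (what is proved, stated in full; the proofs are below) =====
def Claim_equal_search : Prop := ∀ (nums : List Int) (steps : Int) (length : Int), Dom_search nums steps length → Pre_search nums steps length → Spec_search nums steps length (search nums steps length)

-- ===== LEMMAS AND PROOFS =====

-- total element access shared by the hash characterisation
def pvG (nums : List Int) (i : Int) : Int := PySem.List.pyGetD nums i 0

-- mathematical polynomial hash of the window of size s starting at t (no modulus)
def pvH (nums : List Int) (s : Nat) (t : Int) : Int :=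
  ((List.range s).map (fun (j : Nat) => pvG nums (t + (j : Int)) * (26 : Int) ^ (s - 1 - j))).sum

lemma pvmod64 (x : Int) : PySem.Int.mod x (2 ^ 64) = x % 2 ^ 64 :=
  PySem.Int.mod_eq_emod_of_pos (by norm_num)

lemma pvmod_absorb_seed (x b : Int) :
    (x % 2 ^ 64 * 26 + b) % 2 ^ 64 = (x * 26 + b) % 2 ^ 64 := by
  conv_lhs => rw [Int.add_emod, Int.mul_emod, Int.emod_emod_of_dvd x dvd_rfl,
    ← Int.mul_emod, ← Int.add_emod]

lemma pvmod_absorb_step (x a p b : Int) :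
    (x % 2 ^ 64 * 26 - a * (p % 2 ^ 64) + b) % 2 ^ 64
      = (x * 26 - a * p + b) % 2 ^ 64 := by
  have h1 : x % 2 ^ 64 * 26 % 2 ^ 64 = x * 26 % 2 ^ 64 := by
    rw [Int.mul_emod, Int.emod_emod_of_dvd x dvd_rfl, ← Int.mul_emod]
  have h2 : a * (p % 2 ^ 64) % 2 ^ 64 = a * p % 2 ^ 64 := by
    rw [Int.mul_emod, Int.emod_emod_of_dvd p dvd_rfl, ← Int.mul_emod]
  rw [Int.add_emod, Int.sub_emod, h1, h2, ← Int.sub_emod, ← Int.add_emod]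

lemma pvH_right (nums : List Int) (s : Nat) (t : Int) :
    pvH nums (s + 1) t = pvH nums s t * 26 + pvG nums (t + s) := by
  unfold pvH
  rw [List.range_succ, List.map_append, List.sum_append]
  have hcg : ∀ j ∈ List.range s,
      pvG nums (t + j) * 26 ^ (s + 1 - 1 - j)
        = (fun j : Nat => pvG nums (t + j) * 26 ^ (s - 1 - j)) j * 26 := by
    intro j hj
    rw [List.mem_range] at hj
    have he : s + 1 - 1 - j = (s - 1 - j) + 1 := by omega
    rw [he, pow_succ]; ring
  rw [List.map_congr_left hcg, List.sum_map_mul_right]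
  simp

lemma pvH_left (nums : List Int) (s : Nat) (t : Int) :
    pvH nums (s + 1) t = pvG nums t * 26 ^ s + pvH nums s (t + 1) := by
  unfold pvH
  rw [List.range_succ_eq_map, List.map_cons, List.sum_cons, List.map_map]
  have hcg : ∀ j ∈ List.range s,
      ((fun j : Nat => pvG nums (t + j) * 26 ^ (s + 1 - 1 - j)) ∘ Nat.succ) j
        = pvG nums (t + 1 + j) * 26 ^ (s - 1 - j) := by
    intro j hj
    rw [List.mem_range] at hj
    simp only [Function.comp_apply]
    have he : s + 1 - 1 - Nat.succ j = s - 1 - j := by omega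
    have ha : t + (Nat.succ j : Nat) = t + 1 + (j : Nat) := by push_cast; ring
    rw [he, ha]
  rw [List.map_congr_left hcg]
  simp

lemma pvH_step (nums : List Int) (s : Nat) (t : Int) :
    pvH nums s (t + 1) = pvH nums s t * 26 - pvG nums t * 26 ^ s + pvG nums (t + s) := by
  have h1 := pvH_right nums s t
  have h2 := pvH_left nums s t
  linarith

lemma pvsum_emod_congr {β : Type} (l : List β) (u v : β → Int)
    (h : ∀ x ∈ l, u x % 2 ^ 64 = v x % 2 ^ 64) :
    (l.map u).sum % 2 ^ 64 = (l.map v).sum % 2 ^ 64 := by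
  induction l with
  | nil => rfl
  | cons a l ih =>
    simp only [List.map_cons, List.sum_cons]
    rw [Int.add_emod, h a (by simp), ih (fun x hx => h x (by simp [hx])), ← Int.add_emod,
      Int.add_emod (v a), ← Int.add_emod]

lemma pvseedA (nums : List Int) (s : Nat) :
    (PySem.List.pyRange 0 ((s : Nat) : Int) 1).foldl
      (fun prev i => PySem.Int.mod (prev * 26 + PySem.List.pyGetD nums i 0) (2 ^ 64)) 0
    = pvH nums s 0 % 2 ^ 64 := by
  induction s with
  | zero =>
    simp [PySem.List.pyRange_one_eq_nil, pvH]
  | succ s ih =>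
    have hcast : ((s + 1 : Nat) : Int) = ((s : Nat) : Int) + 1 := by push_cast; ring
    rw [hcast, PySem.List.pyRange_one_succ_right (Int.natCast_nonneg s), List.foldl_append]
    simp only [List.foldl_cons, List.foldl_nil]
    rw [ih, pvmod64, pvmod_absorb_seed, pvH_right]
    simp [pvG]

lemma pvpowers_eq (s : Nat) :
    altPowers ((s : Nat) : Int) (2 ^ 64)
      = (List.range s).map (fun k => 26 ^ (s - 1 - k) % 2 ^ 64) := by
  unfold altPowers
  rw [PySem.List.pyRange_zero_natCast, List.map_map]
  apply List.map_congr_left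
  intro k hk
  rw [List.mem_range] at hk
  simp only [Function.comp_apply]
  have h1 : (((s : Nat) : Int) - 1 - ((k : Nat) : Int)).toNat = s - 1 - k := by omega
  rw [h1]
  simp [PySem.Int.powMod]

lemma pvwindowB (nums : List Int) (s : Nat) (t : Int) :
    altWindowHash nums (altPowers ((s : Nat) : Int) (2 ^ 64)) (2 ^ 64) t
      = pvH nums s t % 2 ^ 64 := by
  unfold altWindowHash
  rw [pvmod64, PySem.List.foldl_add, PySem.List.enumerate_eq_map_pyRange _ 0, List.map_map]
  have hlen : PySem.List.len (altPowers ((s : Nat) : Int) (2 ^ 64)) = ((s : Nat) : Int) := by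
    rw [pvpowers_eq]; simp
  rw [hlen, PySem.List.pyRange_zero_natCast, List.map_map]
  have hcg : ∀ k ∈ List.range s,
      (((fun jp : Int × Int => PySem.List.pyGetD nums (t + jp.1) 0 * jp.2)
        ∘ (fun j : Int => (j, PySem.List.pyGetD (altPowers ((s : Nat) : Int) (2 ^ 64)) j 0)))
            ∘ (fun k : Nat => ((k : Nat) : Int))) k
        = pvG nums (t + k) * (26 ^ (s - 1 - k) % 2 ^ 64) := by
    intro k hk
    rw [List.mem_range] at hk
    simp only [Function.comp_apply, pvG]
    congr 1
    rw [pvpowers_eq, PySem.List.pyGetD_natCast, List.getD_eq_getElem?_getD,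
      List.getElem?_map, List.getElem?_range hk]
    rfl
  rw [List.map_congr_left hcg, zero_add]
  have := pvsum_emod_congr (List.range s)
    (fun k => pvG nums (t + k) * (26 ^ (s - 1 - k) % 2 ^ 64))
    (fun k => pvG nums (t + k) * 26 ^ (s - 1 - k))
    (fun k _ => by
      rw [Int.mul_emod, Int.emod_emod_of_dvd _ dvd_rfl, ← Int.mul_emod])
  rw [this]
  rfl

lemma pvloopsEq (nums : List Int) (s : Nat) :
    ∀ (k : Nat) (t : Int) (seen : PySem.Set Int),
      aLoop nums ((s : Nat) : Int) (PySem.Int.powMod 26 (((s : Nat) : Int)).toNat (2 ^ 64)) (2 ^ 64)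
          k t (pvH nums s (t - 1) % 2 ^ 64) seen
      = altLoop nums (altPowers ((s : Nat) : Int) (2 ^ 64)) (2 ^ 64) k t seen := by
  intro k
  induction k with
  | zero => intro t seen; simp [aLoop, altLoop]
  | succ k ih =>
    intro t seen
    have hA : PySem.Int.mod ((pvH nums s (t - 1) % 2 ^ 64) * 26
          - PySem.List.pyGetD nums (t - 1) 0 * PySem.Int.powMod 26 (((s : Nat) : Int)).toNat (2 ^ 64)
          + PySem.List.pyGetD nums (t + ((s : Nat) : Int) - 1) 0) (2 ^ 64)
        = pvH nums s t % 2 ^ 64 := by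
      rw [pvmod64]
      have htn : (((s : Nat) : Int)).toNat = s := Int.toNat_natCast s
      rw [htn]
      simp only [PySem.Int.powMod, pvmod64]
      rw [pvmod_absorb_step]
      have harg : t + ((s : Nat) : Int) - 1 = (t - 1) + ((s : Nat) : Int) := by ring
      rw [harg]
      have hstep := pvH_step nums s (t - 1)
      have ht : t - 1 + 1 = t := by ring
      rw [ht] at hstep
      unfold pvG at hstep
      rw [← hstep]
    simp only [aLoop, altLoop, hA, pvwindowB]
    by_cases hmem : pvH nums s t % 18446744073709551616 ∈ seen
    · simp [hmem]
    · have ih' := ih (t + 1) (seen ++ [pvH nums s t % 2 ^ 64])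
      have ht : t + 1 - 1 = t := by ring
      rw [ht] at ih'
      simp [hmem]
      simpa using ih'

-- ===== VERDICT (by name: the statement is the Claim_ definition above) =====
theorem search_spec : Claim_equal_search := by
  intro nums steps length _ hpre
  unfold Spec_search
  obtain ⟨hs, -, -⟩ := hpre
  set s := steps.toNat with hsdef
  have hsteps : steps = ((s : Nat) : Int) := (Int.toNat_of_nonneg hs).symm
  rw [hsteps]
  simp only [search, search_alt]
  rw [pvseedA nums s, pvwindowB nums s 0]
  have h0 : pvH nums s 0 % 2 ^ 64 = pvH nums s (1 - 1) % 2 ^ 64 := by norm_num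
  rw [h0]
  exact pvloopsEq nums s _ 1 _
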